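-- pv_equiv track=rewrite | github.com/aliscafo/NLProc | question-answering/task-4.py | to_words
-- ===== SOURCE A (Python) =====
-- def to_words(item):
--     pos = []
--     i = 0
--     for word in item['context']:
--         word_len = len(word)
--         pos.append((i, word_len))
--         i += word_len
--     return pos
-- ===== SOURCE B (Python) =====
-- def to_words(item):
--     lengths = [len(w) for w in item['context']]
--     offsets = [sum(lengths[:k]) for k in range(len(lengths))]
--     return list(zip(offsets, lengths))
-- ===== Notes on version B (the rewrite author's own statement) =====
-- stated objective: alternative
-- what changed: Replaces A's single fused loop threading a running offset counter with a table-based decomposition: build the lengths list, derive each offset as the sum of the preceding lengths, and zip the two tables.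
import Mathlib
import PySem

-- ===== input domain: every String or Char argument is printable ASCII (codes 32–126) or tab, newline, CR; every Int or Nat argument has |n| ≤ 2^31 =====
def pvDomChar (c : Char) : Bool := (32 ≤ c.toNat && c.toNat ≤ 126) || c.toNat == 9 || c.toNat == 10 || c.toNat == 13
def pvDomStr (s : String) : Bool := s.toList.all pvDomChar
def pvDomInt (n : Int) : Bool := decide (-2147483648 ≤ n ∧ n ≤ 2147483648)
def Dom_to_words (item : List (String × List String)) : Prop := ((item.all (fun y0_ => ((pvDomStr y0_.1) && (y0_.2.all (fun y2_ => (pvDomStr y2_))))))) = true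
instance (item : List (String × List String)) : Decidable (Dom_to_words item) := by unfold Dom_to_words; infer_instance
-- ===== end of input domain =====

-- B replaces the fused running-counter loop by separate lengths/offsets tables combined with zip (alternative decomposition, not faster).

-- ===== PORT A =====
-- A: a single loop appending (i, len(word)) and advancing i by len(word).
def to_words (item : List (String × List String)) : List (Int × Int) :=
  match List.lookup "context" item with
  | none => []     -- KeyError in Python; excluded by Pre_to_words
  | some ctx =>
    (ctx.foldl (fun (s : List (Int × Int) × Int) w =>
        (s.1 ++ [(s.2, (PySem.Str.len w : Int))], s.2 + (PySem.Str.len w : Int))) ([], 0)).1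

-- ===== PORT B =====
-- B: lengths table, offsets as sums of length prefixes, then zip.
def to_words_alt (item : List (String × List String)) : List (Int × Int) :=
  match List.lookup "context" item with
  | none => []     -- KeyError in Python; excluded by Pre_to_words
  | some ctx =>
    let lengths : List Int := ctx.map (fun w => (PySem.Str.len w : Int))
    let offsets : List Int := (List.range lengths.length).map (fun k => (lengths.take k).sum)
    offsets.zip lengths

-- ===== PRECONDITION & SPEC =====
-- Pre_ excludes exactly the inputs with no "context" key, on which Python A raises KeyError.
def Pre_to_words (item : List (String × List String)) : Prop :=
  (List.lookup "context" item).isSome = true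
instance (item : List (String × List String)) : Decidable (Pre_to_words item) := by
  unfold Pre_to_words; infer_instance
def pvWitness_to_words : (List (String × List String)) := [("context", ["ab", "", "cde"])]
def Spec_to_words (item : List (String × List String)) (out : List (Int × Int)) : Prop := out = to_words_alt item
instance (item : List (String × List String)) (out : List (Int × Int)) : Decidable (Spec_to_words item out) := by unfold Spec_to_words; infer_instance

-- ===== CLAIM (what is proved, stated in full; the proofs are below) =====
def Claim_equal_to_words : Prop := ∀ (item : List (String × List String)), Dom_to_words item → Pre_to_words item → Spec_to_words item (to_words item)

-- ===== LEMMAS AND PROOFS =====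

-- The fused loop over ctx, started at accumulator (acc, i), produces acc followed by
-- the zip of the i-shifted prefix sums of the lengths with the lengths.
theorem to_words_loop (ctx : List String) (acc : List (Int × Int)) (i : Int) :
    (ctx.foldl (fun (s : List (Int × Int) × Int) w =>
        (s.1 ++ [(s.2, (PySem.Str.len w : Int))], s.2 + (PySem.Str.len w : Int))) (acc, i)).1
    = acc ++ (((List.range ctx.length).map
        (fun k => i + ((ctx.map (fun w => (PySem.Str.len w : Int))).take k).sum)).zip
        (ctx.map (fun w => (PySem.Str.len w : Int)))) := by
  induction ctx generalizing acc i with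
  | nil => simp
  | cons w t ih =>
    simp only [List.foldl_cons, List.map_cons, List.length_cons,
      List.range_succ_eq_map, List.map_map]
    rw [ih]
    simp [List.zip_cons_cons, Function.comp_def, List.take_succ_cons, add_assoc, List.append_assoc]

theorem to_words_spec : Claim_equal_to_words := by
  intro item _ _
  unfold Spec_to_words to_words to_words_alt
  cases h : List.lookup "context" item with
  | none => rfl
  | some ctx =>
    simp only
    rw [to_words_loop]
    simp
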